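-- pv_equiv track=rewrite | github.com/Dinopit/DinoAir2.0dev | src/tools/control/restrictions.py | _find_next_window
-- ===== SOURCE A (Python) =====
-- from typing import Dict, Any, Optional, List, Tuple, Set
--
-- def _find_next_window(
--
--     current_hour: int,
--     windows: List[Tuple[int, int]]
-- ) -> Optional[int]:
--     """Find the next available window start hour"""
--     # Sort windows by start time
--     sorted_windows = sorted(windows, key=lambda w: w[0])
--
--     # Find next window after current hour
--     for start, _ in sorted_windows:
--         if start > current_hour:
--             return start
--
--     # If no window found today, return first window tomorrow
--     if sorted_windows:
--         return sorted_windows[0][0]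
--     return None
-- ===== SOURCE B (Python) =====
-- from typing import Dict, Any, Optional, List, Tuple, Set
--
-- def _find_next_window(
--     current_hour: int,
--     windows: List[Tuple[int, int]]
-- ) -> Optional[int]:
--     """Find the next available window start hour (single pass, no sort)."""
--     best_global = None
--     best_after = None
--     for start, _ in windows:
--         if best_global is None or start < best_global:
--             best_global = start
--         if start > current_hour and (best_after is None or start < best_after):
--             best_after = start
--     return best_after if best_after is not None else best_global
-- ===== Notes on version B (the rewrite author's own statement) =====
-- stated objective: faster
-- what changed: Replaces sort-then-scan (sorted copy, first start > current_hour, else head of sorted list) by a single linear pass that tracks the minimum start overall and the minimum start strictly greater than current_hour.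
import Mathlib
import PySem

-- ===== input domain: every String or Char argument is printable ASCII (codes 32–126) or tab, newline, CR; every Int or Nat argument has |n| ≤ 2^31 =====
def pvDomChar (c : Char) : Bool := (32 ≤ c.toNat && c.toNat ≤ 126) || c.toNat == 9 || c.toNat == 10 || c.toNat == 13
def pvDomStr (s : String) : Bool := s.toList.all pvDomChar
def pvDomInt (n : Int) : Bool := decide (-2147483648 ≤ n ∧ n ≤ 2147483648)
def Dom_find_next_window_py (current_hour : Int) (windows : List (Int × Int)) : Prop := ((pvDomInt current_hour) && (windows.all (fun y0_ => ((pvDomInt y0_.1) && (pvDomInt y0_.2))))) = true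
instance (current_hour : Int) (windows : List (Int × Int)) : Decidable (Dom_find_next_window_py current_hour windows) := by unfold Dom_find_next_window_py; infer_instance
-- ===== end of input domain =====

-- B replaces A's sort-then-scan by one linear pass tracking two running minima (objective: faster).

-- ===== PORT A =====
-- the 'for start, _ in sorted_windows: if start > current_hour: return start' loop
def pvScanA (current_hour : Int) : List (Int × Int) → Option Int
  | [] => none
  | (start, _) :: t => if start > current_hour then some start else pvScanA current_hour t

def find_next_window_py (current_hour : Int) (windows : List (Int × Int)) : Option Int :=
  let sorted_windows := PySem.List.sorted windows (fun w => w.1) false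
  match pvScanA current_hour sorted_windows with
  | some s => some s
  | none =>
    match sorted_windows with
    | [] => none
    | (s, _) :: _ => some s

-- ===== PORT B =====
-- one step of the loop body of Source B: update (best_global, best_after) with one window
def pvStepB (current_hour : Int) (st : Option Int × Option Int) (w : Int × Int) : Option Int × Option Int :=
  let best_global :=
    match st.1 with
    | none => some w.1
    | some g => if w.1 < g then some w.1 else some g
  let best_after :=
    if w.1 > current_hour then
      match st.2 with
      | none => some w.1
      | some a => if w.1 < a then some w.1 else some a
    else st.2
  (best_global, best_after)

def find_next_window_py_alt (current_hour : Int) (windows : List (Int × Int)) : Option Int :=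
  let st := windows.foldl (pvStepB current_hour) (none, none)
  match st.2 with
  | some a => some a
  | none => st.1

-- ===== PRECONDITION & SPEC =====
def Spec_find_next_window_py (current_hour : Int) (windows : List (Int × Int)) (out : Option Int) : Prop := out = find_next_window_py_alt current_hour windows
instance (current_hour : Int) (windows : List (Int × Int)) (out : Option Int) : Decidable (Spec_find_next_window_py current_hour windows out) := by unfold Spec_find_next_window_py; infer_instance

-- ===== CLAIM (what is proved, stated in full; the proofs are below) =====
def Claim_equal_find_next_window_py : Prop := ∀ (current_hour : Int) (windows : List (Int × Int)), Dom_find_next_window_py current_hour windows → Spec_find_next_window_py current_hour windows (find_next_window_py current_hour windows)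

-- ===== LEMMAS AND PROOFS =====

-- the two components of B's fold, as individual folds
def pvGF (st : Option Int) (w : Int × Int) : Option Int :=
  match st with
  | none => some w.1
  | some g => if w.1 < g then some w.1 else some g

def pvAF (c : Int) (st : Option Int) (w : Int × Int) : Option Int :=
  if w.1 > c then
    match st with
    | none => some w.1
    | some a => if w.1 < a then some w.1 else some a
  else st

theorem stepB_split (c : Int) (l : List (Int × Int)) (g a : Option Int) :
    l.foldl (pvStepB c) (g, a) = (l.foldl pvGF g, l.foldl (pvAF c) a) := by
  induction l generalizing g a with
  | nil => rfl
  | cons w t ih => simp [List.foldl, pvStepB, pvGF, pvAF, ih]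

theorem pvGF_eq (st : Option Int) (w : Int × Int) :
    pvGF st w = some (st.elim w.1 (fun g => min w.1 g)) := by
  rcases st with _ | g
  · rfl
  · simp only [pvGF, Option.elim, Option.some.injEq]
    split_ifs <;> simp only [Option.some.injEq] <;> omega

theorem pvAF_eq (c : Int) (st : Option Int) (w : Int × Int) :
    pvAF c st w = if c < w.1 then some (st.elim w.1 (fun a => min w.1 a)) else st := by
  rcases st with _ | a <;> simp only [pvAF, gt_iff_lt, Option.elim] <;>
    split_ifs <;> first | rfl | (simp only [Option.some.injEq]; omega)

theorem pvGF_rcomm (st : Option Int) (w v : Int × Int) :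
    pvGF (pvGF st w) v = pvGF (pvGF st v) w := by
  rcases st with _ | g <;>
    simp only [pvGF_eq, Option.elim, Option.some.injEq] <;> omega

theorem pvAF_rcomm (c : Int) (st : Option Int) (w v : Int × Int) :
    pvAF c (pvAF c st w) v = pvAF c (pvAF c st v) w := by
  rcases st with _ | a <;> simp only [pvAF_eq] <;> split_ifs <;>
    first | rfl | (simp only [Option.elim, Option.some.injEq]; omega)

theorem foldl_gf_perm {l₁ l₂ : List (Int × Int)} (h : l₁.Perm l₂) (st : Option Int) :
    l₁.foldl pvGF st = l₂.foldl pvGF st :=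
  h.foldl_eq' (fun x _ y _ z => pvGF_rcomm z x y) st

theorem foldl_af_perm (c : Int) {l₁ l₂ : List (Int × Int)} (h : l₁.Perm l₂) (st : Option Int) :
    l₁.foldl (pvAF c) st = l₂.foldl (pvAF c) st :=
  h.foldl_eq' (fun x _ y _ z => pvAF_rcomm c z x y) st

-- folding pvGF from a value ≤ every element changes nothing
theorem foldl_gf_stays (l : List (Int × Int)) (s : Int) (h : ∀ w ∈ l, s ≤ w.1) :
    l.foldl pvGF (some s) = some s := by
  induction l with
  | nil => rfl
  | cons w t ih =>
    have hw := h w (by simp)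
    have : pvGF (some s) w = some s := by simp [pvGF]; omega
    simp only [List.foldl, this]
    exact ih (fun v hv => h v (by simp [hv]))

theorem foldl_af_stays (c : Int) (l : List (Int × Int)) (s : Int) (h : ∀ w ∈ l, s ≤ w.1) :
    l.foldl (pvAF c) (some s) = some s := by
  induction l with
  | nil => rfl
  | cons w t ih =>
    have hw := h w (by simp)
    have : pvAF c (some s) w = some s := by
      simp only [pvAF]; split_ifs <;> simp <;> omega
    simp only [List.foldl, this]
    exact ih (fun v hv => h v (by simp [hv]))

-- on a list sorted by first component, A's scan computes the best_after fold
theorem scanA_eq_af (c : Int) (l : List (Int × Int))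
    (hs : l.Pairwise (fun x y => x.1 ≤ y.1)) :
    pvScanA c l = l.foldl (pvAF c) none := by
  induction l with
  | nil => rfl
  | cons w t ih =>
    rcases List.pairwise_cons.mp hs with ⟨hle, ht⟩
    by_cases hc : w.1 > c
    · have h1 : pvScanA c (w :: t) = some w.1 := by
        cases w; simp [pvScanA, hc]
      have h2 : pvAF c none w = some w.1 := by simp [pvAF, hc]
      rw [h1, List.foldl, h2, foldl_af_stays c t w.1 hle]
    · have h1 : pvScanA c (w :: t) = pvScanA c t := by
        cases w; simp_all [pvScanA]
      have h2 : pvAF c none w = none := by simp [pvAF, hc]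
      rw [h1, List.foldl, h2, ih ht]

-- on a sorted nonempty list, best_global fold is the head's first component
theorem head_eq_gf (l : List (Int × Int)) (w : Int × Int) (t : List (Int × Int))
    (hl : l = w :: t) (hs : l.Pairwise (fun x y => x.1 ≤ y.1)) :
    l.foldl pvGF none = some w.1 := by
  subst hl
  rcases List.pairwise_cons.mp hs with ⟨hle, _⟩
  have h2 : pvGF none w = some w.1 := by simp [pvGF]
  rw [List.foldl, h2, foldl_gf_stays t w.1 hle]

-- ===== VERDICT (by name: the statement is the Claim_ definition above) =====
theorem find_next_window_py_spec : Claim_equal_find_next_window_py := by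
  intro c ws _
  unfold Spec_find_next_window_py find_next_window_py find_next_window_py_alt
  set sw := PySem.List.sorted ws (fun w => w.1) false with hsw
  have hperm : sw.Perm ws := PySem.List.sorted_perm ws (fun w => w.1) false
  have hpw : sw.Pairwise (fun x y => x.1 ≤ y.1) :=
    PySem.List.sorted_pairwise ws (fun w => w.1)
  rw [stepB_split, ← foldl_af_perm c hperm, ← foldl_gf_perm hperm]
  rw [← scanA_eq_af c sw hpw]
  dsimp only
  rcases hA : pvScanA c sw with _ | s
  · rcases hl : sw with _ | ⟨w, t⟩
    · rfl
    · have hg := head_eq_gf sw w t hl hpw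
      rw [hl] at hg
      simpa using hg.symm
  · rfl
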